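-- pv_equiv track=rewrite | github.com/V-lad-K/GeekHub-homework | HT_12/task_01.py | issue_notes
-- ===== SOURCE A (Python) =====
-- def issue_notes(inputed_amount, cash_machine):
--     def collect(amount, banknotes):
--         if amount == 0:
--             return {}
--
--         if not banknotes:
--             return None
--
--         current_banknote = banknotes[0]
--         available_banknotes = cash_machine[current_banknote]
--         notes_needed = amount // current_banknote
--         number_of_notes = int(min(available_banknotes, notes_needed))
--
--         for i in range(number_of_notes, -1, -1):
--             result = collect(amount - i * current_banknote, banknotes[1:])
--             if result is not None:
--                 return {current_banknote: i, **result} if i else result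
--
--     banknotes = [*cash_machine.keys()]
--
--     return collect(inputed_amount, banknotes)
-- ===== SOURCE B (Python) =====
-- def issue_notes(inputed_amount, cash_machine):
--     # Memoized feasibility over (remaining amount, denomination index), then a
--     # greedy reconstruction that takes the largest feasible count per denomination.
--     denoms = [*cash_machine.keys()]
--     memo = {}
--
--     def feasible(amount, j):
--         if amount == 0:
--             return True
--         if j == len(denoms):
--             return False
--         key = (amount, j)
--         if key in memo:
--             return memo[key]
--         d = denoms[j]
--         n = int(min(cash_machine[d], amount // d))
--         ok = False
--         for i in range(n, -1, -1):
--             if feasible(amount - i * d, j + 1):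
--                 ok = True
--                 break
--         memo[key] = ok
--         return ok
--
--     def rebuild(amount, j):
--         if amount == 0:
--             return {}
--         d = denoms[j]
--         n = int(min(cash_machine[d], amount // d))
--         for i in range(n, -1, -1):
--             if feasible(amount - i * d, j + 1):
--                 rest = rebuild(amount - i * d, j + 1)
--                 return {d: i, **rest} if i else rest
--
--     if not feasible(inputed_amount, 0):
--         return None
--     return rebuild(inputed_amount, 0)
-- ===== Notes on version B (the rewrite author's own statement) =====
-- stated objective: faster
-- what changed: A's backtracking search that returns the note dictionary directly is replaced by a memoized feasibility function over (remaining amount, denomination index) plus a separate greedy reconstruction taking the largest feasible count per denomination, so subproblems A re-explores exponentially often are computed once.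
-- outside the precondition, e.g. on issue_notes(5, {2: -1, 0: 3}): A returns None, B returns None; on issue_notes(10, {10: 1, 0: 5}): A returns {10: 1}, B returns {10: 1}
import Mathlib
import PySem

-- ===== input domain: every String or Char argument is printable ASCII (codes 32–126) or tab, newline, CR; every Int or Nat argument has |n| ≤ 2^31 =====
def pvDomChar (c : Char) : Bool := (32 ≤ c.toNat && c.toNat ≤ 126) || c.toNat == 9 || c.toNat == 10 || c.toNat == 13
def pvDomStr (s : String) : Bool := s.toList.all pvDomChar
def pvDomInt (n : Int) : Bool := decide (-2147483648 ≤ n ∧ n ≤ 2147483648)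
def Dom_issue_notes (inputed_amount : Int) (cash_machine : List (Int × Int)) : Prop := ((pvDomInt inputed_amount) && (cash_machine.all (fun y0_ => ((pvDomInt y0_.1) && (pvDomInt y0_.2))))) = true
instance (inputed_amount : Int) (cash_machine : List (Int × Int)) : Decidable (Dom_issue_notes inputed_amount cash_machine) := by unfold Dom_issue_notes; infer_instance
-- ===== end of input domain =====

-- B replaces A's backtracking search (which returns the note dictionary directly) by a memoized
-- feasibility function over (remaining amount, denomination index) plus a separate greedy
-- reconstruction taking the largest feasible note count per denomination: each subproblem of A's
-- search is computed once (measured faster in a timing run).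

-- ===== PORT A =====
-- collect(amount, banknotes): the recursive backtracking search of A.
def collectA (cm : PySem.Dict Int Int) (amount : Int) (banknotes : List Int) :
    Option (List (Int × Int)) :=
  if amount = 0 then some []
  else
    match banknotes with
    | [] => none
    | d :: rest =>
      let n := min (cm.getD d 0) (PySem.Int.floordiv amount d)
      -- for i in range(number_of_notes, -1, -1): return on the first non-None result
      (PySem.List.pyRange n (-1) (-1)).foldl
        (fun acc i =>
          match acc with
          | some _ => acc
          | none =>
            match collectA cm (amount - i * d) rest with
            | some r => some (if i = 0 then r else (d, i) :: r)
            | none => none)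
        none
termination_by banknotes.length
decreasing_by simp

def issue_notes (inputed_amount : Int) (cash_machine : List (Int × Int)) :
    Option (List (Int × Int)) :=
  let cm := PySem.Dict.ofList cash_machine   -- the Python argument IS a dict built from these pairs
  collectA cm inputed_amount cm.keys

-- ===== PORT B =====
-- feasible(amount, j) with memo threaded through; denoms is the suffix of the key list from index j.
def feasB (cm : PySem.Dict Int Int) (amount : Int) (denoms : List Int) (j : Int)
    (memo : PySem.Dict (Int × Int) Bool) : Bool × PySem.Dict (Int × Int) Bool :=
  if amount = 0 then (true, memo)
  else
    match denoms with
    | [] => (false, memo)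
    | d :: rest =>
      match memo.get? (amount, j) with
      | some b => (b, memo)
      | none =>
        let n := min (cm.getD d 0) (PySem.Int.floordiv amount d)
        -- for i in range(n, -1, -1): if feasible(amount - i*d, j+1): ok = True; break
        let r := (PySem.List.pyRange n (-1) (-1)).foldl
          (fun acc i =>
            if acc.1 then acc
            else feasB cm (amount - i * d) rest (j + 1) acc.2)
          (false, memo)
        (r.1, r.2.insert (amount, j) r.1)
termination_by denoms.length
decreasing_by simp

-- rebuild(amount, j): i = next(i for i in range(n, -1, -1) if feasible(...)); recurse.
-- The `none` branches are unreachable when called on a feasible state (there Python's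
-- next()/indexing would raise, but rebuild is only invoked after the feasibility check).
def rebuildB (cm : PySem.Dict Int Int) (amount : Int) (denoms : List Int) (j : Int)
    (memo : PySem.Dict (Int × Int) Bool) :
    Option (List (Int × Int)) × PySem.Dict (Int × Int) Bool :=
  if amount = 0 then (some [], memo)
  else
    match denoms with
    | [] => (none, memo)
    | d :: rest =>
      let n := min (cm.getD d 0) (PySem.Int.floordiv amount d)
      let fr := (PySem.List.pyRange n (-1) (-1)).foldl
        (fun acc i =>
          match acc.1 with
          | some _ => acc
          | none =>
            let f := feasB cm (amount - i * d) rest (j + 1) acc.2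
            (if f.1 then some i else none, f.2))
        (none, memo)
      match fr.1 with
      | none => (none, fr.2)
      | some i =>
        let t := rebuildB cm (amount - i * d) rest (j + 1) fr.2
        (if i = 0 then t.1 else t.1.map (fun tl => (d, i) :: tl), t.2)
termination_by denoms.length
decreasing_by simp

def issue_notes_alt (inputed_amount : Int) (cash_machine : List (Int × Int)) :
    Option (List (Int × Int)) :=
  let cm := PySem.Dict.ofList cash_machine
  let denoms := cm.keys
  let f := feasB cm inputed_amount denoms 0 PySem.Dict.empty
  if f.1 then (rebuildB cm inputed_amount denoms 0 f.2).1 else none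

-- ===== PRECONDITION & SPEC =====
-- Pre_ excludes machines containing a 0 denomination when the amount is nonzero: whenever the
-- search reaches the 0 note with a nonzero remainder both programs raise ZeroDivisionError there,
-- and on the remaining such machines (the 0 note is never reached) the agreement is accidental,
-- so it is not claimed.
def Pre_issue_notes (inputed_amount : Int) (cash_machine : List (Int × Int)) : Prop :=
  (∀ p ∈ cash_machine, p.1 ≠ 0) ∨ inputed_amount = 0
instance (inputed_amount : Int) (cash_machine : List (Int × Int)) : Decidable (Pre_issue_notes inputed_amount cash_machine) := by unfold Pre_issue_notes; infer_instance
def pvWitness_issue_notes : Int × (List (Int × Int)) := (11, [(5, 3), (2, 4)])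

def Spec_issue_notes (inputed_amount : Int) (cash_machine : List (Int × Int)) (out : Option (List (Int × Int))) : Prop := out = issue_notes_alt inputed_amount cash_machine
instance (inputed_amount : Int) (cash_machine : List (Int × Int)) (out : Option (List (Int × Int))) : Decidable (Spec_issue_notes inputed_amount cash_machine out) := by unfold Spec_issue_notes; infer_instance

-- ===== CLAIM (what is proved, stated in full; the proofs are below) =====
def Claim_equal_issue_notes : Prop := ∀ (inputed_amount : Int) (cash_machine : List (Int × Int)), Dom_issue_notes inputed_amount cash_machine → Pre_issue_notes inputed_amount cash_machine → Spec_issue_notes inputed_amount cash_machine (issue_notes inputed_amount cash_machine)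

-- ===== LEMMAS AND PROOFS =====

-- Pure (memo-free) feasibility: the specification both programs' searches decide.
def feasP (cm : PySem.Dict Int Int) (amount : Int) (denoms : List Int) : Bool :=
  if amount = 0 then true
  else
    match denoms with
    | [] => false
    | d :: rest =>
      let n := min (cm.getD d 0) (PySem.Int.floordiv amount d)
      (PySem.List.pyRange n (-1) (-1)).any (fun i => feasP cm (amount - i * d) rest)
termination_by denoms.length
decreasing_by simp

-- Memo coherence: every stored entry (a, j) ↦ b is the pure feasibility of a on the suffix from j.
def Coh (cm : PySem.Dict Int Int) (DS : List Int) (memo : PySem.Dict (Int × Int) Bool) : Prop :=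
  ∀ a j b, memo.get? (a, j) = some b → 0 ≤ j ∧ b = feasP cm a (DS.drop j.toNat)


-- first-some folds (A's loop shape), concrete to collectA's body
theorem collectA_foldl_keep (cm : PySem.Dict Int Int) (d amount : Int) (rest : List Int) :
    ∀ (L : List Int) (b : List (Int × Int)),
      L.foldl (fun acc i =>
        match acc with
        | some _ => acc
        | none =>
          match collectA cm (amount - i * d) rest with
          | some r => some (if i = 0 then r else (d, i) :: r)
          | none => none) (some b) = some b := by
  intro L
  induction L with
  | nil => intro b; rfl
  | cons i L ih => intro b; simpa using ih b

theorem collectA_foldl_eq (cm : PySem.Dict Int Int) (d amount : Int) (rest : List Int) :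
    ∀ (L : List Int),
      L.foldl (fun acc i =>
        match acc with
        | some _ => acc
        | none =>
          match collectA cm (amount - i * d) rest with
          | some r => some (if i = 0 then r else (d, i) :: r)
          | none => none) none
      = (L.find? (fun i => (collectA cm (amount - i * d) rest).isSome)).bind
          (fun i => (collectA cm (amount - i * d) rest).map
            (fun r => if i = 0 then r else (d, i) :: r)) := by
  intro L
  induction L with
  | nil => rfl
  | cons i L ih =>
    simp only [List.foldl_cons, List.find?_cons]
    cases hc : collectA cm (amount - i * d) rest with
    | none => simpa [hc] using ih
    | some r => simp [hc, collectA_foldl_keep]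

-- A's cons step, as find?-then-bind
theorem collectA_cons (cm : PySem.Dict Int Int) (amount d : Int) (rest : List Int)
    (h : amount ≠ 0) :
    collectA cm amount (d :: rest) =
      ((PySem.List.pyRange (min (cm.getD d 0) (PySem.Int.floordiv amount d)) (-1) (-1)).find?
         (fun i => (collectA cm (amount - i * d) rest).isSome)).bind
        (fun i => (collectA cm (amount - i * d) rest).map
          (fun r => if i = 0 then r else (d, i) :: r)) := by
  rw [collectA]
  simp only [if_neg h]
  exact collectA_foldl_eq cm d amount rest _

theorem pv_isSome_bind_find {α β : Type} (q : α → Bool) (f : α → Option β)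
    (hq : ∀ i, (f i).isSome = q i) (L : List α) :
    ((L.find? q).bind f).isSome = L.any q := by
  cases hfind : L.find? q with
  | none =>
    have := List.find?_eq_none.mp hfind
    simp only [Option.bind_none, Option.isSome_none]
    exact (List.any_eq_false.mpr (by simpa using this)).symm
  | some i =>
    have hqi := List.find?_some hfind
    have hmem := List.mem_of_find?_eq_some hfind
    simp only [Option.bind_some, hq i, hqi]
    exact (List.any_eq_true.mpr ⟨i, hmem, hqi⟩).symm

-- A's result is Some exactly on feasible states
theorem collectA_isSome (cm : PySem.Dict Int Int) :
    ∀ (denoms : List Int) (amount : Int),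
      (collectA cm amount denoms).isSome = feasP cm amount denoms := by
  intro denoms
  induction denoms with
  | nil =>
    intro amount
    rw [collectA, feasP]
    by_cases h : amount = 0 <;> simp [h]
  | cons d rest ih =>
    intro amount
    by_cases h : amount = 0
    · rw [collectA, feasP]; simp [h]
    · rw [collectA_cons cm amount d rest h, feasP]
      simp only [if_neg h]
      rw [pv_isSome_bind_find (fun i => (collectA cm (amount - i * d) rest).isSome)
        (fun i => (collectA cm (amount - i * d) rest).map
          (fun r => if i = 0 then r else (d, i) :: r))
        (fun i => Option.isSome_map ..)]
      exact congrArg _ (funext fun i => ih (amount - i * d))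

-- bool folds (the short-circuiting any-loop of feasible), over an abstract step function
theorem pv_foldl_keepTrue {M : Type} (step : Bool × M → Int → Bool × M)
    (htrue : ∀ m i, step (true, m) i = (true, m)) :
    ∀ (L : List Int) (m : M), L.foldl step (true, m) = (true, m) := by
  intro L
  induction L with
  | nil => intro m; rfl
  | cons i L ih => intro m; rw [List.foldl_cons, htrue]; exact ih m

theorem pv_foldl_any_inv {M : Type} (step : Bool × M → Int → Bool × M)
    (P : Int → Bool) (C : M → Prop)
    (htrue : ∀ m i, step (true, m) i = (true, m))
    (hfalse : ∀ m i, C m → (step (false, m) i).1 = P i ∧ C (step (false, m) i).2) :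
    ∀ (L : List Int) (m : M), C m →
      (L.foldl step (false, m)).1 = L.any P ∧ C (L.foldl step (false, m)).2 := by
  intro L
  induction L with
  | nil => intro m hm; exact ⟨rfl, hm⟩
  | cons i L ih =>
    intro m hm
    obtain ⟨h1, h2⟩ := hfalse m i hm
    rw [List.foldl_cons, List.any_cons]
    cases hP : P i with
    | true =>
      have hFi : step (false, m) i = (true, (step (false, m) i).2) := by
        rw [Prod.ext_iff]; exact ⟨by rw [h1, hP], rfl⟩
      rw [hFi, pv_foldl_keepTrue step htrue]
      exact ⟨by simp, h2⟩
    | false =>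
      have hFi : step (false, m) i = (false, (step (false, m) i).2) := by
        rw [Prod.ext_iff]; exact ⟨by rw [h1, hP], rfl⟩
      rw [hFi]
      obtain ⟨g1, g2⟩ := ih (step (false, m) i).2 h2
      exact ⟨by rw [g1]; simp, g2⟩

-- memoized feasibility computes pure feasibility and preserves coherence
theorem feasB_correct (cm : PySem.Dict Int Int) (DS : List Int) :
    ∀ (denoms : List Int) (j amount : Int) (memo : PySem.Dict (Int × Int) Bool),
      0 ≤ j → denoms = DS.drop j.toNat → Coh cm DS memo →
      (feasB cm amount denoms j memo).1 = feasP cm amount denoms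
      ∧ Coh cm DS (feasB cm amount denoms j memo).2 := by
  intro denoms
  induction denoms with
  | nil =>
    intro j amount memo hj hdrop hC
    rw [feasB, feasP]
    by_cases h : amount = 0
    · exact ⟨by simp [h], by simpa [h] using hC⟩
    · exact ⟨by simp [h], by simpa [h] using hC⟩
  | cons d rest ih =>
    intro j amount memo hj hdrop hC
    by_cases h : amount = 0
    · rw [feasB, feasP]
      exact ⟨by simp [h], by simpa [h] using hC⟩
    · have hrest : rest = DS.drop (j + 1).toNat := by
        have h1 : (j + 1).toNat = j.toNat + 1 := by omega
        rw [h1, ← List.tail_drop, ← hdrop]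
        rfl
      rw [feasB, feasP]
      simp only [if_neg h]
      cases hget : memo.get? (amount, j) with
      | some b =>
        obtain ⟨_, hb⟩ := hC amount j b hget
        refine ⟨?_, hC⟩
        rw [hb, ← hdrop, feasP]
        simp [if_neg h]
      | none =>
        obtain ⟨g1, g2⟩ := pv_foldl_any_inv
          (fun acc i => if acc.1 then acc else feasB cm (amount - i * d) rest (j + 1) acc.2)
          (fun i => feasP cm (amount - i * d) rest)
          (Coh cm DS)
          (fun m i => by simp)
          (fun m i hm => by
            simpa using ih (j + 1) (amount - i * d) m (by omega) hrest hm)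
          (PySem.List.pyRange (min (cm.getD d 0) (PySem.Int.floordiv amount d)) (-1) (-1))
          memo hC
        refine ⟨g1, ?_⟩
        intro a j' b hget'
        rw [PySem.Dict.get?_insert] at hget'
        by_cases hk : (a, j') = (amount, j)
        · have ha : a = amount := congrArg Prod.fst hk
          have hj' : j' = j := congrArg Prod.snd hk
          subst ha; subst hj'
          rw [if_pos rfl] at hget'
          refine ⟨hj, ?_⟩
          cases hget'
          rw [g1, ← hdrop, feasP]
          simp [if_neg h]
        · rw [if_neg hk] at hget'
          exact g2 a j' b hget'

-- option folds (the next()-scan of rebuild), over an abstract step function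
theorem pv_foldl_keepFound {M : Type} (step : Option Int × M → Int → Option Int × M)
    (hsome : ∀ m x i, step (some x, m) i = (some x, m)) :
    ∀ (L : List Int) (x : Int) (m : M), L.foldl step (some x, m) = (some x, m) := by
  intro L
  induction L with
  | nil => intro x m; rfl
  | cons i L ih => intro x m; rw [List.foldl_cons, hsome]; exact ih x m

theorem pv_foldl_find_inv {M : Type} (step : Option Int × M → Int → Option Int × M)
    (P : Int → Bool) (C : M → Prop)
    (hsome : ∀ m x i, step (some x, m) i = (some x, m))
    (hnone : ∀ m i, C m →
      ((step (none, m) i).1 = if P i then some i else none) ∧ C (step (none, m) i).2) :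
    ∀ (L : List Int) (m : M), C m →
      (L.foldl step (none, m)).1 = L.find? P ∧ C (L.foldl step (none, m)).2 := by
  intro L
  induction L with
  | nil => intro m hm; exact ⟨rfl, hm⟩
  | cons i L ih =>
    intro m hm
    obtain ⟨h1, h2⟩ := hnone m i hm
    rw [List.foldl_cons, List.find?_cons]
    cases hP : P i with
    | true =>
      have hFi : step (none, m) i = (some i, (step (none, m) i).2) := by
        rw [Prod.ext_iff]; exact ⟨by rw [h1, hP]; simp, rfl⟩
      rw [hFi, pv_foldl_keepFound step hsome]
      exact ⟨by simp, h2⟩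
    | false =>
      have hFi : step (none, m) i = (none, (step (none, m) i).2) := by
        rw [Prod.ext_iff]; exact ⟨by rw [h1, hP]; simp, rfl⟩
      rw [hFi]
      exact ih (step (none, m) i).2 h2

-- the reconstruction returns exactly A's dictionary on feasible states
theorem rebuildB_correct (cm : PySem.Dict Int Int) (DS : List Int) :
    ∀ (denoms : List Int) (j amount : Int) (memo : PySem.Dict (Int × Int) Bool),
      0 ≤ j → denoms = DS.drop j.toNat → Coh cm DS memo →
      feasP cm amount denoms = true →
      (rebuildB cm amount denoms j memo).1 = collectA cm amount denoms := by
  intro denoms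
  induction denoms with
  | nil =>
    intro j amount memo hj hdrop hC hfeas
    rw [feasP] at hfeas
    by_cases h : amount = 0
    · rw [rebuildB, collectA]; simp [h]
    · simp [h] at hfeas
  | cons d rest ih =>
    intro j amount memo hj hdrop hC hfeas
    by_cases h : amount = 0
    · rw [rebuildB, collectA]; simp [h]
    · have hrest : rest = DS.drop (j + 1).toNat := by
        have h1 : (j + 1).toNat = j.toNat + 1 := by omega
        rw [h1, ← List.tail_drop, ← hdrop]
        rfl
      obtain ⟨g1, g2⟩ := pv_foldl_find_inv
        (fun acc i =>
          match acc.1 with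
          | some _ => acc
          | none =>
            let f := feasB cm (amount - i * d) rest (j + 1) acc.2
            (if f.1 then some i else none, f.2))
        (fun i => feasP cm (amount - i * d) rest)
        (Coh cm DS)
        (fun m x i => by simp)
        (fun m i hm => by
          obtain ⟨e1, e2⟩ := feasB_correct cm DS rest (j + 1) (amount - i * d) m
            (by omega) hrest hm
          exact ⟨by simpa using (by rw [e1] : _), by simpa using e2⟩)
        (PySem.List.pyRange (min (cm.getD d 0) (PySem.Int.floordiv amount d)) (-1) (-1))
        memo hC
      rw [rebuildB]
      simp only [if_neg h]
      rw [g1]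
      have hq : (fun i => (collectA cm (amount - i * d) rest).isSome)
          = fun i => feasP cm (amount - i * d) rest :=
        funext fun i => collectA_isSome cm rest (amount - i * d)
      rw [collectA_cons cm amount d rest h, hq]
      cases hfind : List.find? (fun i => feasP cm (amount - i * d) rest)
          (PySem.List.pyRange (min (cm.getD d 0) (PySem.Int.floordiv amount d)) (-1) (-1)) with
      | none => simp
      | some i =>
        have hPi := List.find?_some hfind
        have hsub : (rebuildB cm (amount - i * d) rest (j + 1)
            (List.foldl _ (none, memo) _).2).1 = collectA cm (amount - i * d) rest :=
          ih (j + 1) (amount - i * d) _ (by omega) hrest g2 hPi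
        obtain ⟨r, hr⟩ := Option.isSome_iff_exists.mp
          (by rw [collectA_isSome cm rest (amount - i * d)]; exact hPi)
        simp only [Option.bind_some]
        rw [hr] at hsub
        by_cases hi : i = 0
        · subst hi
          simp only [zero_mul, sub_zero] at hsub hr
          simp [hsub, hr]
        · simp [hi, hsub, hr]

theorem issue_notes_spec : Claim_equal_issue_notes := by
  intro inputed_amount cash_machine _hdom _hpre
  unfold Spec_issue_notes issue_notes issue_notes_alt
  set cm := PySem.Dict.ofList cash_machine with hcm
  set DS := cm.keys with hDS
  have hCoh : Coh cm DS PySem.Dict.empty := by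
    intro a j b hget
    rw [PySem.Dict.get?_empty] at hget
    cases hget
  obtain ⟨f1, f2⟩ := feasB_correct cm DS DS 0 inputed_amount PySem.Dict.empty
    (le_refl 0) (by simp) hCoh
  by_cases hf : feasP cm inputed_amount DS = true
  · rw [if_pos (by rw [f1]; exact hf)]
    exact (rebuildB_correct cm DS DS 0 inputed_amount _ (le_refl 0) (by simp) f2 hf).symm
  · rw [if_neg (by rw [f1]; exact hf)]
    have h2 : (collectA cm inputed_amount DS).isSome = false := by
      rw [collectA_isSome cm DS inputed_amount]
      simpa using hf
    cases hc : collectA cm inputed_amount DS with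
    | none => rfl
    | some r => rw [hc] at h2; simp at h2
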